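-- pv_equiv track=rewrite | github.com/clo-bT/Algorithm | 프로그래머스/0/120956. 옹알이 （1）/옹알이 （1）.py | solution
-- ===== SOURCE A (Python) =====
-- def solution(babbling):
--     answer = 0
--     li = ["aya", "ye", "woo", "ma"]
--     for i in range(4):
--         for j in range(4):
--             if i != j:
--                 li.append(li[i]+li[j])
--     for i in range(4):
--         for j in range(4):
--             for k in range(4):
--                 if i != j and i != k and j != k:
--                     li.append(li[i]+li[j]+li[k])
--     for i in range(4):
--         for j in range(4):
--             for k in range(4):
--                 for r in range(4):
--                     if i != j and i != k and i != r and j != k and j != r and k != r: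
--                         li.append(li[i]+li[j]+li[k]+li[r])
--     for bab in babbling:
--         if bab in li:
--             answer += 1
--     return answer
-- ===== SOURCE B (Python) =====
-- def solution(babbling):
--     words = ["aya", "ye", "woo", "ma"]
--     answer = 0
--     for bab in babbling:
--         s = bab
--         used = [False, False, False, False]
--         ok = bool(s)
--         while s and ok:
--             for idx in range(4):
--                 w = words[idx]
--                 if not used[idx] and s.startswith(w):
--                     used[idx] = True
--                     s = s[len(w):]
--                     break
--             else:
--                 ok = False
--         if ok:
--             answer += 1
--     return answer
-- ===== Notes on version B (the rewrite author's own statement) =====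
-- stated objective: alternative
-- what changed: A pre-generates all 64 concatenations of 1-4 distinct words and does a membership test per string; B builds no candidate table and instead greedily parses each string left-to-right against the four (prefix-free) words with a used-flag per word.
import Mathlib
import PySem

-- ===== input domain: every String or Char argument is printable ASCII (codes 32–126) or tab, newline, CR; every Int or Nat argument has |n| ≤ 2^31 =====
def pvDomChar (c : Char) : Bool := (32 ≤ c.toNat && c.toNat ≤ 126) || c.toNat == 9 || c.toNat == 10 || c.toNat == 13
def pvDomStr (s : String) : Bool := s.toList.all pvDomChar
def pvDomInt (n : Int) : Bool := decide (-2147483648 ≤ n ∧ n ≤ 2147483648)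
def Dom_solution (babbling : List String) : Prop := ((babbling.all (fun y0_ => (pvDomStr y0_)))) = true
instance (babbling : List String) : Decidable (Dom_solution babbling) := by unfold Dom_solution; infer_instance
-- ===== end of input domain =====

set_option maxRecDepth 16384


-- B replaces A's precomputed 64-entry candidate table and per-string linear scan by a
-- greedy prefix parse against the four words with one used-flag each (objective: alternative).

-- ===== PORT A =====
-- literal transliteration of A: build li by the three nested index loops, then count members
def pvBuildLi : List String :=
  let li0 : List String := ["aya", "ye", "woo", "ma"]
  let li1 : List String :=
    (PySem.List.pyRange 0 4 1).foldl (fun li i =>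
      (PySem.List.pyRange 0 4 1).foldl (fun li j =>
        if i ≠ j then li ++ [PySem.List.pyGetD li i "" ++ PySem.List.pyGetD li j ""] else li) li) li0
  let li2 : List String :=
    (PySem.List.pyRange 0 4 1).foldl (fun li i =>
      (PySem.List.pyRange 0 4 1).foldl (fun li j =>
        (PySem.List.pyRange 0 4 1).foldl (fun li k =>
          if i ≠ j ∧ i ≠ k ∧ j ≠ k then
            li ++ [PySem.List.pyGetD li i "" ++ PySem.List.pyGetD li j "" ++ PySem.List.pyGetD li k ""]
          else li) li) li) li1
  (PySem.List.pyRange 0 4 1).foldl (fun li i =>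
    (PySem.List.pyRange 0 4 1).foldl (fun li j =>
      (PySem.List.pyRange 0 4 1).foldl (fun li k =>
        (PySem.List.pyRange 0 4 1).foldl (fun li r =>
          if i ≠ j ∧ i ≠ k ∧ i ≠ r ∧ j ≠ k ∧ j ≠ r ∧ k ≠ r then
            li ++ [PySem.List.pyGetD li i "" ++ PySem.List.pyGetD li j "" ++
                   PySem.List.pyGetD li k "" ++ PySem.List.pyGetD li r ""]
          else li) li) li) li) li2

def solution (babbling : List String) : Int :=
  babbling.foldl (fun answer bab => if bab ∈ pvBuildLi then answer + 1 else answer) 0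

-- ===== PORT B =====
-- greedy parse of Source B's while/startswith loop: the four words start with distinct letters,
-- so at most one word can match as a prefix; a used word may not be consumed again
def pvCheck : Bool → Bool → Bool → Bool → List Char → Bool
  | _, _, _, _, [] => true
  | a, y, w, m, 'a' :: 'y' :: 'a' :: cs => !a && pvCheck true y w m cs
  | a, y, w, m, 'y' :: 'e' :: cs => !y && pvCheck a true w m cs
  | a, y, w, m, 'w' :: 'o' :: 'o' :: cs => !w && pvCheck a y true m cs
  | a, y, w, m, 'm' :: 'a' :: cs => !m && pvCheck a y w true cs
  | _, _, _, _, _ => false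

def solution_alt (babbling : List String) : Int :=
  babbling.foldl (fun answer bab =>
    if (!bab.toList.isEmpty && pvCheck false false false false bab.toList) = true
    then answer + 1 else answer) 0

-- ===== PRECONDITION & SPEC =====
def Spec_solution (babbling : List String) (out : Int) : Prop := out = solution_alt babbling
instance (babbling : List String) (out : Int) : Decidable (Spec_solution babbling out) := by unfold Spec_solution; infer_instance

-- ===== CLAIM (what is proved, stated in full; the proofs are below) =====
def Claim_equal_solution : Prop := ∀ (babbling : List String), Dom_solution babbling → Spec_solution babbling (solution babbling)

-- ===== LEMMAS AND PROOFS =====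

-- the four words, as char lists, and the candidate table A builds, as a literal
def pvWord : Fin 4 → List Char
  | 0 => ['a', 'y', 'a']
  | 1 => ['y', 'e']
  | 2 => ['w', 'o', 'o']
  | 3 => ['m', 'a']

def pvFlag (a y w m : Bool) : Fin 4 → Bool
  | 0 => a
  | 1 => y
  | 2 => w
  | 3 => m

def pvLiLit : List String :=
  ["aya", "ye", "woo", "ma", "ayaye", "ayawoo", "ayama", "yeaya", "yewoo", "yema", "wooaya", "wooye", "wooma", "maaya", "maye", "mawoo", "ayayewoo", "ayayema", "ayawooye", "ayawooma", "ayamaye", "ayamawoo", "yeayawoo", "yeayama", "yewooaya", "yewooma", "yemaaya", "yemawoo", "wooayaye", "wooayama", "wooyeaya", "wooyema", "woomaaya", "woomaye", "maayaye", "maayawoo", "mayeaya", "mayewoo", "mawooaya", "mawooye", "ayayewooma", "ayayemawoo", "ayawooyema", "ayawoomaye", "ayamayewoo", "ayamawooye", "yeayawooma", "yeayamawoo", "yewooayama", "yewoomaaya", "yemaayawoo", "yemawooaya", "wooayayema", "wooayamaye", "wooyeayama", "wooyemaaya", "woomaayaye", "woomayeaya", "maayayewoo", "maayawooye", "mayeayawoo",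 "mayewooaya", "mawooayaye", "mawooyeaya"]

set_option maxHeartbeats 1000000 in
theorem pvBuildLi_eq : pvBuildLi = pvLiLit := by decide

theorem pvFwd : ∀ s ∈ pvLiLit, (!s.toList.isEmpty && pvCheck false false false false s.toList) = true := by
  decide

-- if the greedy parse accepts, the string is a concatenation of distinct currently-unused words
theorem pvParse (a y w m : Bool) (cs : List Char) (h : pvCheck a y w m cs = true) :
    ∃ ws : List (Fin 4), ws.Nodup ∧ (∀ i ∈ ws, pvFlag a y w m i = false) ∧
      cs = (ws.map pvWord).flatten := by
  induction a, y, w, m, cs using pvCheck.induct with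
  | case1 => exact ⟨[], by simp⟩
  | case2 a y w m cs ih =>
    simp only [pvCheck, Bool.and_eq_true, Bool.not_eq_true'] at h
    obtain ⟨ws, hnd, hfl, hcs⟩ := ih h.2
    have h0 : (0 : Fin 4) ∉ ws := fun hm => by simpa [pvFlag] using hfl 0 hm
    refine ⟨0 :: ws, by simp [h0, hnd], ?_, by simp [pvWord, hcs]⟩
    intro i hi
    rcases List.mem_cons.mp hi with rfl | hi
    · simpa [pvFlag] using h.1
    · have := hfl i hi
      fin_cases i <;> simp_all [pvFlag]
  | case3 a y w m cs ih =>
    simp only [pvCheck, Bool.and_eq_true, Bool.not_eq_true'] at h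
    obtain ⟨ws, hnd, hfl, hcs⟩ := ih h.2
    have h0 : (1 : Fin 4) ∉ ws := fun hm => by simpa [pvFlag] using hfl 1 hm
    refine ⟨1 :: ws, by simp [h0, hnd], ?_, by simp [pvWord, hcs]⟩
    intro i hi
    rcases List.mem_cons.mp hi with rfl | hi
    · simpa [pvFlag] using h.1
    · have := hfl i hi
      fin_cases i <;> simp_all [pvFlag]
  | case4 a y w m cs ih =>
    simp only [pvCheck, Bool.and_eq_true, Bool.not_eq_true'] at h
    obtain ⟨ws, hnd, hfl, hcs⟩ := ih h.2
    have h0 : (2 : Fin 4) ∉ ws := fun hm => by simpa [pvFlag] using hfl 2 hm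
    refine ⟨2 :: ws, by simp [h0, hnd], ?_, by simp [pvWord, hcs]⟩
    intro i hi
    rcases List.mem_cons.mp hi with rfl | hi
    · simpa [pvFlag] using h.1
    · have := hfl i hi
      fin_cases i <;> simp_all [pvFlag]
  | case5 a y w m cs ih =>
    simp only [pvCheck, Bool.and_eq_true, Bool.not_eq_true'] at h
    obtain ⟨ws, hnd, hfl, hcs⟩ := ih h.2
    have h0 : (3 : Fin 4) ∉ ws := fun hm => by simpa [pvFlag] using hfl 3 hm
    refine ⟨3 :: ws, by simp [h0, hnd], ?_, by simp [pvWord, hcs]⟩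
    intro i hi
    rcases List.mem_cons.mp hi with rfl | hi
    · simpa [pvFlag] using h.1
    · have := hfl i hi
      fin_cases i <;> simp_all [pvFlag]
  | case6 a y w m cs h1 h2 h3 h4 h5 => simp [pvCheck] at h

-- every nonempty sequence of distinct word indices concatenates to a table entry
theorem pvMem1 : ∀ i : Fin 4, (([i].map pvWord).flatten) ∈ pvLiLit.map String.toList := by decide
theorem pvMem2 : ∀ i j : Fin 4, i ≠ j → (([i, j].map pvWord).flatten) ∈ pvLiLit.map String.toList := by decide
theorem pvMem3 : ∀ i j k : Fin 4, i ≠ j → i ≠ k → j ≠ k →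
    (([i, j, k].map pvWord).flatten) ∈ pvLiLit.map String.toList := by decide
theorem pvMem4 : ∀ i j k r : Fin 4, i ≠ j → i ≠ k → i ≠ r → j ≠ k → j ≠ r → k ≠ r →
    (([i, j, k, r].map pvWord).flatten) ∈ pvLiLit.map String.toList := by decide

theorem pvMemOfWs (ws : List (Fin 4)) (hnd : ws.Nodup) (hne : ws ≠ []) :
    ((ws.map pvWord).flatten) ∈ pvLiLit.map String.toList := by
  have hlen : ws.length ≤ 4 := by
    simpa using List.Nodup.length_le_card hnd
  match ws, hnd, hne, hlen with
  | [i], _, _, _ => exact pvMem1 i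
  | [i, j], hnd, _, _ =>
    simp only [List.nodup_cons, List.mem_cons, List.not_mem_nil, or_false] at hnd
    exact pvMem2 i j hnd.1
  | [i, j, k], hnd, _, _ =>
    simp only [List.nodup_cons, List.mem_cons, List.not_mem_nil, or_false, not_or] at hnd
    exact pvMem3 i j k hnd.1.1 hnd.1.2 hnd.2.1
  | [i, j, k, r], hnd, _, _ =>
    simp only [List.nodup_cons, List.mem_cons, List.not_mem_nil, or_false, not_or] at hnd
    exact pvMem4 i j k r hnd.1.1 hnd.1.2.1 hnd.1.2.2 hnd.2.1.1 hnd.2.1.2 hnd.2.2.1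
  | _ :: _ :: _ :: _ :: _ :: _, _, _, hlen => exact absurd hlen (by simp)

theorem pvMain (s : String) :
    (s ∈ pvBuildLi) ↔ (!s.toList.isEmpty && pvCheck false false false false s.toList) = true := by
  rw [pvBuildLi_eq]
  constructor
  · exact fun h => pvFwd s h
  · intro h
    simp only [Bool.and_eq_true, Bool.not_eq_true', List.isEmpty_eq_false_iff] at h
    obtain ⟨ws, hnd, _, hcs⟩ := pvParse false false false false s.toList h.2
    have hne : ws ≠ [] := by
      rintro rfl
      simp [hcs] at h
    have hmem := pvMemOfWs ws hnd hne
    rw [← hcs] at hmem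
    obtain ⟨t, ht, hts⟩ := List.mem_map.mp hmem
    have : t = s := String.toList_injective hts
    exact this ▸ ht

theorem pvFold (l : List String) (acc : Int) :
    l.foldl (fun answer bab => if bab ∈ pvBuildLi then answer + 1 else answer) acc =
    l.foldl (fun answer bab =>
      if (!bab.toList.isEmpty && pvCheck false false false false bab.toList) = true
      then answer + 1 else answer) acc := by
  induction l generalizing acc with
  | nil => rfl
  | cons bab l ih =>
    simp only [List.foldl_cons]
    by_cases h : bab ∈ pvBuildLi
    · rw [if_pos h, if_pos ((pvMain bab).mp h)]; exact ih _
    · rw [if_neg h, if_neg (fun hc => h ((pvMain bab).mpr hc))]; exact ih _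

-- ===== VERDICT (by name: the statement is the Claim_ definition above) =====
theorem solution_spec : Claim_equal_solution := by
  intro babbling _
  unfold Spec_solution solution solution_alt
  exact pvFold babbling 0
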